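-- pv_equiv track=rewrite | github.com/Dtzz81/kata_braces | source/main.py | wild_braces
-- ===== SOURCE A (Python) =====
-- def wild_braces(string):
--     counter_p = 0
--     for i in string:
--         if i == '(':
--             counter_p += 1
--         elif i == ')':
--             counter_p -= 1
--
--     counter_b = 0
--     for i in string:
--         if i == '[':
--             counter_b += 1
--         elif i == ']':
--             counter_b -= 1
--
--
--     if counter_p == 0 and counter_b == 0:
--         return True
--     else:
--         return False
-- ===== SOURCE B (Python) =====
-- def wild_braces(string):
--     # Single pass: encode both balances in one integer. Parens weigh +/-1,
--     # brackets weigh +/-(len+1); since |paren balance| <= len < len+1, the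
--     # weighted sum is 0 iff both balances are 0.
--     m = len(string) + 1
--     weight = {'(': 1, ')': -1, '[': m, ']': -m}
--     return sum(weight.get(ch, 0) for ch in string) == 0
-- ===== Notes on version B (the rewrite author's own statement) =====
-- stated objective: alternative
-- what changed: Replaces A's two tally loops and two-counter zero test with a single weighted-sum pass: parens weigh +/-1, brackets weigh +/-(len(string)+1), and the string is balanced iff the one sum is 0 (correct since the paren balance has magnitude at most len < len+1).
import Mathlib
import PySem

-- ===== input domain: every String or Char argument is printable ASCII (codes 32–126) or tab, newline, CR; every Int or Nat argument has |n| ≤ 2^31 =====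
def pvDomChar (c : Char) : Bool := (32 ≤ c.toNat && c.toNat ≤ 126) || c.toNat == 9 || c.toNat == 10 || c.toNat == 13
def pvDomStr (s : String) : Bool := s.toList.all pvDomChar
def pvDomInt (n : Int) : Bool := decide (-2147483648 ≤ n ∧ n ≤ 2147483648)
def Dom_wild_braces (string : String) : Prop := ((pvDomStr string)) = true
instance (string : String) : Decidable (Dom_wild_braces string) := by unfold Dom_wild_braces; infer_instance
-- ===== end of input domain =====

-- B replaces A's two tally loops by ONE weighted sum (brackets weighed by len+1) compared to 0; exact equivalence.

-- ===== PORT A =====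
def wild_braces (string : String) : Bool :=
  let counter_p : Int := string.toList.foldl
    (fun c i => if i = '(' then c + 1 else if i = ')' then c - 1 else c) 0
  let counter_b : Int := string.toList.foldl
    (fun c i => if i = '[' then c + 1 else if i = ']' then c - 1 else c) 0
  if counter_p = 0 ∧ counter_b = 0 then true else false

-- ===== PORT B =====
-- B: one pass summing weights from a dict (+/-1 for parens, +/-(len+1) for brackets); sum == 0 iff balanced.
def wild_braces_alt (string : String) : Bool :=
  let m : Int := PySem.Str.len string + 1
  let weight : PySem.Dict Char Int := PySem.Dict.ofList [('(', 1), (')', -1), ('[', m), (']', -m)]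
  (string.toList.map (fun ch => weight.getD ch 0)).sum == 0

-- ===== PRECONDITION & SPEC =====
def Spec_wild_braces (string : String) (out : Bool) : Prop := out = wild_braces_alt string
instance (string : String) (out : Bool) : Decidable (Spec_wild_braces string out) := by unfold Spec_wild_braces; infer_instance

-- ===== CLAIM (what is proved, stated in full; the proofs are below) =====
def Claim_equal_wild_braces : Prop := ∀ (string : String), Dom_wild_braces string → Spec_wild_braces string (wild_braces string)

-- ===== LEMMAS AND PROOFS =====

-- A's tally loop computes (count a) - (count b).
theorem countA (l : List Char) (a b : Char) (hab : a ≠ b) (n : Int) :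
    l.foldl (fun c i => if i = a then c + 1 else if i = b then c - 1 else c) n
      = n + l.count a - l.count b := by
  induction l generalizing n with
  | nil => simp
  | cons x xs ih =>
    simp only [List.foldl_cons, List.count_cons, beq_iff_eq, ih]
    split_ifs with h1 h2
    · exact absurd (h1.symm.trans h2) hab
    · push_cast; ring
    · push_cast; ring
    · push_cast; ring

-- evaluate B's dict lookup as an if-chain.
theorem getD_weight (m : Int) (x : Char) :
    (PySem.Dict.ofList [('(', 1), (')', -1), ('[', m), (']', -m)]).getD x 0
      = if x = '(' then 1 else if x = ')' then -1 else if x = '[' then m else if x = ']' then -m else 0 := by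
  simp only [PySem.Dict.ofList, PySem.Dict.update, List.foldl_cons, List.foldl_nil,
    PySem.Dict.getD_insert, PySem.Dict.getD_empty]
  split_ifs <;> simp_all

-- B's weighted sum decomposes into the two balances.
theorem sumB (l : List Char) (m : Int) :
    (l.map (fun ch =>
      (PySem.Dict.ofList [('(', 1), (')', -1), ('[', m), (']', -m)]).getD ch 0)).sum
      = ((l.count '(' : Int) - l.count ')') + m * ((l.count '[' : Int) - l.count ']') := by
  induction l with
  | nil => simp
  | cons x xs ih =>
    rw [List.map_cons, List.sum_cons, ih, getD_weight]
    by_cases h1 : x = '(' <;> by_cases h2 : x = ')' <;> by_cases h3 : x = '[' <;>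
      by_cases h4 : x = ']' <;>
      simp only [h1, h2, h3, h4, List.count_cons, beq_iff_eq] <;>
      simp_all <;> (try push_cast) <;> ring

theorem wild_braces_spec : Claim_equal_wild_braces := by
  intro s _
  unfold Spec_wild_braces wild_braces wild_braces_alt
  simp only [countA s.toList '(' ')' (by decide), countA s.toList '[' ']' (by decide),
    sumB, PySem.Str.len_eq, zero_add]
  set l := s.toList with hl
  have hp1 : l.count '(' ≤ l.length := List.count_le_length
  have hp2 : l.count ')' ≤ l.length := List.count_le_length
  set p : Int := (l.count '(' : Int) - l.count ')' with hp
  set b : Int := (l.count '[' : Int) - l.count ']' with hb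
  set m : Int := (l.length : Int) + 1 with hm
  have hpb : -((l.length : Int)) ≤ p ∧ p ≤ (l.length : Int) := by
    constructor <;> [skip; skip] <;> simp only [hp] <;> omega
  by_cases hb0 : b = 0
  · by_cases hp0 : p = 0
    · simp [hp0, hb0]
    · rw [if_neg (fun h => hp0 h.1), hb0]
      simp only [mul_zero, add_zero]
      exact (beq_eq_false_iff_ne.mpr hp0).symm
  · rw [if_neg (fun h => hb0 h.2)]
    have hne : p + m * b ≠ 0 := by
      rcases lt_or_gt_of_ne hb0 with hneg | hpos
      · have h1 : b ≤ -1 := by omega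
        have : m * b ≤ m * (-1) := by
          apply mul_le_mul_of_nonneg_left h1 (by omega)
        omega
      · have h1 : 1 ≤ b := by omega
        have : m * 1 ≤ m * b := by
          apply mul_le_mul_of_nonneg_left h1 (by omega)
        omega
    exact (beq_eq_false_iff_ne.mpr hne).symm
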